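-- pv_equiv track=rewrite | github.com/yvonneyt903yv-debug/Agent | gps/publisher/publish_clean.py | normalize_spacing
-- ===== SOURCE A (Python) =====
-- def normalize_spacing(text: str) -> str:
--     lines = text.splitlines()
--     out: list[str] = []
--     blank = 0
--     for line in lines:
--         if line.strip():
--             blank = 0
--             out.append(line.rstrip())
--         else:
--             blank += 1
--             if blank <= 1:
--                 out.append("")
--     return "\n".join(out).strip() + "\n"
-- ===== SOURCE B (Python) =====
-- def normalize_spacing(text: str) -> str:
--     paragraphs: list[str] = []
--     current: list[str] = []
--     for line in text.splitlines():
--         if line.strip():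
--             current.append(line.rstrip())
--         elif current:
--             paragraphs.append("\n".join(current))
--             current = []
--     if current:
--         paragraphs.append("\n".join(current))
--     return "\n\n".join(paragraphs).strip() + "\n"
-- ===== Notes on version B (the rewrite author's own statement) =====
-- stated objective: alternative
-- what changed: B accumulates runs of non-blank lines into paragraphs and joins the paragraphs with a double newline separator, instead of A's per-line blank counter that emits a single empty line per blank run.
import Mathlib
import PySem

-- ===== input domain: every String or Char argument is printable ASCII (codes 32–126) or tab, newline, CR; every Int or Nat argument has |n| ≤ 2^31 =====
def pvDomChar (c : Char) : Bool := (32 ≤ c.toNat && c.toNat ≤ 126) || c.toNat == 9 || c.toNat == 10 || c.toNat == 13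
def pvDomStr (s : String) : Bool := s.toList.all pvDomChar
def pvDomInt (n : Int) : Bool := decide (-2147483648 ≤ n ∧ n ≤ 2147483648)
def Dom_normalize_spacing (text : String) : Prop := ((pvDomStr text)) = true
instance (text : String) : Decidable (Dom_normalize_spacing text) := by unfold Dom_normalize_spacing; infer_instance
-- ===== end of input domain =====

-- B collapses blank runs by accumulating paragraphs and joining them with a double
-- newline separator, instead of A's per-line blank counter; an alternative decomposition, same cost.

-- ===== PORT A =====
-- the loop body of A: state = (out, blank)
def stepA (acc : List (List Char) × Int) (line : List Char) : List (List Char) × Int :=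
  if PySem.Chars.strip line ≠ [] then
    (acc.1 ++ [PySem.Chars.rstrip line], 0)
  else
    if acc.2 + 1 ≤ 1 then (acc.1 ++ [([] : List Char)], acc.2 + 1)
    else (acc.1, acc.2 + 1)

def normalize_spacing (text : String) : String :=
  let lines := PySem.Chars.splitlines text.toList
  let r := lines.foldl stepA ([], 0)
  String.ofList (PySem.Chars.strip (PySem.Chars.join ['\n'] r.1) ++ ['\n'])

-- ===== PORT B =====
-- the loop body of B: state = (paragraphs, current)
def stepB (acc : List (List Char) × List (List Char)) (line : List Char) :
    List (List Char) × List (List Char) :=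
  if PySem.Chars.strip line ≠ [] then (acc.1, acc.2 ++ [PySem.Chars.rstrip line])
  else if acc.2 ≠ [] then (acc.1 ++ [PySem.Chars.join ['\n'] acc.2], [])
  else acc

def normalize_spacing_alt (text : String) : String :=
  let r := (PySem.Chars.splitlines text.toList).foldl stepB ([], [])
  let paras := if r.2 ≠ [] then r.1 ++ [PySem.Chars.join ['\n'] r.2] else r.1
  String.ofList (PySem.Chars.strip (PySem.Chars.join ['\n', '\n'] paras) ++ ['\n'])

-- ===== PRECONDITION & SPEC =====
def Spec_normalize_spacing (text : String) (out : String) : Prop := out = normalize_spacing_alt text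
instance (text : String) (out : String) : Decidable (Spec_normalize_spacing text out) := by unfold Spec_normalize_spacing; infer_instance

-- ===== CLAIM (what is proved, stated in full; the proofs are below) =====
def Claim_equal_normalize_spacing : Prop := ∀ (text : String), Dom_normalize_spacing text → Spec_normalize_spacing text (normalize_spacing text)

-- ===== LEMMAS AND PROOFS =====

-- A's loop as structural recursion; the Bool is "the previous line was blank".
def runA : List (List Char) → Bool → List (List Char)
  | [], _ => []
  | l :: ls, b =>
    if PySem.Chars.strip l ≠ [] then PySem.Chars.rstrip l :: runA ls false
    else if b then runA ls true else [] :: runA ls true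

-- B's loop as structural recursion; the second argument is the current paragraph.
def runB : List (List Char) → List (List Char) → List (List Char)
  | [], cur => if cur ≠ [] then [PySem.Chars.join ['\n'] cur] else []
  | l :: ls, cur =>
    if PySem.Chars.strip l ≠ [] then runB ls (cur ++ [PySem.Chars.rstrip l])
    else if cur ≠ [] then PySem.Chars.join ['\n'] cur :: runB ls []
    else runB ls []

-- join with the separator BEFORE every element (compositional form of join)
def jp (sep : List Char) : List (List Char) → List Char
  | [] => []
  | x :: xs => sep ++ x ++ jp sep xs

-- whether the last line of ls is blank (vacuously true for [])
def trailBlank : List (List Char) → Bool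
  | [] => true
  | [l] => PySem.Chars.strip l == []
  | _ :: ls => trailBlank ls

def padR (ls : List (List Char)) : List Char := if trailBlank ls then ['\n'] else []
def padQ (ls : List (List Char)) : List Char := if ls.isEmpty then [] else padR ls

theorem foldA (ls : List (List Char)) : ∀ (out : List (List Char)) (blank : Int),
    0 ≤ blank → (ls.foldl stepA (out, blank)).1 = out ++ runA ls (decide (blank ≠ 0)) := by
  induction ls with
  | nil => intro out blank _; simp [runA]
  | cons l ls ih =>
    intro out blank h
    by_cases hl : PySem.Chars.strip l ≠ []
    · rw [List.foldl_cons, show stepA (out, blank) l = (out ++ [PySem.Chars.rstrip l], 0) by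
        simp [stepA, hl], ih _ 0 (le_refl 0)]
      simp [runA, hl]
    · by_cases hb : blank = 0
      · subst hb
        rw [List.foldl_cons, show stepA (out, 0) l = (out ++ [([] : List Char)], 1) by
          simp [stepA, hl], ih _ 1 (by norm_num)]
        simp [runA, hl]
      · have h1 : ¬ ((blank : Int) + 1 ≤ 1) := by omega
        rw [List.foldl_cons, show stepA (out, blank) l = (out, blank + 1) by
          simp [stepA, hl, h1], ih _ (blank + 1) (by omega)]
        simp [runA, hl, hb, show blank + 1 ≠ 0 by omega]

theorem foldB (ls : List (List Char)) : ∀ (paras cur : List (List Char)),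
    (if (ls.foldl stepB (paras, cur)).2 ≠ []
      then (ls.foldl stepB (paras, cur)).1 ++ [PySem.Chars.join ['\n'] (ls.foldl stepB (paras, cur)).2]
      else (ls.foldl stepB (paras, cur)).1) = paras ++ runB ls cur := by
  induction ls with
  | nil => intro paras cur; by_cases h : cur = [] <;> simp [runB, h]
  | cons l ls ih =>
    intro paras cur
    by_cases hl : PySem.Chars.strip l ≠ []
    · rw [List.foldl_cons, show stepB (paras, cur) l = (paras, cur ++ [PySem.Chars.rstrip l]) by
        simp [stepB, hl],
        show runB (l :: ls) cur = runB ls (cur ++ [PySem.Chars.rstrip l]) by simp [runB, hl]]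
      exact ih paras (cur ++ [PySem.Chars.rstrip l])
    · by_cases hc : cur ≠ []
      · rw [List.foldl_cons,
          show stepB (paras, cur) l = (paras ++ [PySem.Chars.join ['\n'] cur], []) by
            simp [stepB, hl, hc],
          show runB (l :: ls) cur = PySem.Chars.join ['\n'] cur :: runB ls [] by
            simp [runB, hl, hc],
          ih _ []]
        simp
      · simp only [not_not] at hc
        subst hc
        rw [List.foldl_cons, show stepB (paras, []) l = (paras, []) by simp [stepB, hl],
          show runB (l :: ls) [] = runB ls [] by simp [runB, hl]]
        exact ih paras []

theorem jp_eq (sep : List Char) (xs : List (List Char)) :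
    jp sep xs = if xs.isEmpty then [] else sep ++ PySem.Chars.join sep xs := by
  induction xs with
  | nil => rfl
  | cons x xs ih =>
    cases xs with
    | nil => simp [jp, PySem.Chars.join_singleton]
    | cons y ys => simp [jp, PySem.Chars.join_cons_cons] at ih ⊢; simp [ih]

theorem join_snoc (sep x : List Char) (xs : List (List Char)) (h : xs ≠ []) :
    PySem.Chars.join sep (xs ++ [x]) = PySem.Chars.join sep xs ++ sep ++ x := by
  induction xs with
  | nil => exact absurd rfl h
  | cons y ys ih =>
    cases ys with
    | nil => simp [PySem.Chars.join_cons_cons, PySem.Chars.join_singleton]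
    | cons z zs =>
      have h2 := ih (by simp)
      simp only [List.cons_append] at h2 ⊢
      rw [PySem.Chars.join_cons_cons, h2, PySem.Chars.join_cons_cons]
      simp

theorem isspace_nl : PySem.Chars.isspace '\n' = true := by decide

theorem strip_cons_nl (s : List Char) :
    PySem.Chars.strip ('\n' :: s) = PySem.Chars.strip s := by
  simp [PySem.Chars.strip, PySem.Chars.lstrip, isspace_nl]

theorem rstrip_snoc_nl (s : List Char) :
    PySem.Chars.rstrip (s ++ ['\n']) = PySem.Chars.rstrip s := by
  simp [PySem.Chars.rstrip, isspace_nl]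

theorem strip_snoc_nl (s : List Char) :
    PySem.Chars.strip (s ++ ['\n']) = PySem.Chars.strip s := by
  simp only [PySem.Chars.strip, PySem.Chars.lstrip, List.dropWhile_append]
  by_cases h : (List.dropWhile PySem.Chars.isspace s).isEmpty
  · have h0 : List.dropWhile PySem.Chars.isspace s = [] := by simpa [List.isEmpty_iff] using h
    simp [h0, PySem.Chars.rstrip, isspace_nl]
  · simpa [h] using rstrip_snoc_nl (List.dropWhile PySem.Chars.isspace s)

-- the core invariant: B's future output vs A's future output, with a possible trailing '\n'
theorem coreQR (ls : List (List Char)) :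
    (∀ cur : List (List Char), cur ≠ [] →
      jp ['\n', '\n'] (runB ls cur) ++ padQ ls =
        '\n' :: '\n' :: (PySem.Chars.join ['\n'] cur ++ jp ['\n'] (runA ls false)))
    ∧ jp ['\n', '\n'] (runB ls []) ++ padR ls = '\n' :: jp ['\n'] (runA ls true) := by
  induction ls with
  | nil =>
    constructor
    · intro cur hc; simp [runB, runA, hc, jp, padQ]
    · simp [runB, runA, jp, padR, trailBlank]
  | cons l ls ih =>
    by_cases hl : PySem.Chars.strip l ≠ []
    · have hpq : padQ (l :: ls) = padQ ls := by
        cases ls with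
        | nil => simp [padQ, padR, trailBlank, show (PySem.Chars.strip l == []) = false by
            simpa using hl]
        | cons y ys => simp [padQ, padR, trailBlank]
      have hq := ih.1
      constructor
      · intro cur hc
        simp only [runB, if_pos hl, runA, jp, hpq]
        rw [hq (cur ++ [PySem.Chars.rstrip l]) (by simp),
            join_snoc _ _ _ hc]
        simp
      · simp only [runB, if_pos hl, runA, jp]
        have hpr : padR (l :: ls) = padQ ls := by
          cases ls with
          | nil => simp [padQ, padR, trailBlank, show (PySem.Chars.strip l == []) = false by
              simpa using hl]
          | cons y ys => simp [padQ, padR, trailBlank]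
        simp only [List.nil_append]
        rw [hpr, hq [PySem.Chars.rstrip l] (by simp)]
        simp [PySem.Chars.join_singleton]
    · have hl' : PySem.Chars.strip l = [] := by simpa using hl
      have hpr : padR (l :: ls) = padR ls := by
        cases ls with
        | nil => simp [padR, trailBlank, hl']
        | cons y ys => simp [padR, trailBlank]
      constructor
      · intro cur hc
        simp only [runB, if_neg hl, if_pos hc, runA, Bool.false_eq_true,
          if_neg (Bool.false_ne_true), jp]
        have hpq : padQ (l :: ls) = padR ls := by simp [padQ, hpr]
        rw [hpq]
        have := ih.2
        simp only [List.append_assoc]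
        rw [this]
        simp [jp]
      · simp only [runB, if_neg hl, if_neg (by simp : ¬ ([] : List (List Char)) ≠ []), runA,
          if_neg hl, if_pos rfl, hpr]
        exact ih.2

theorem strip_jp_eq_strip_join1 (xs : List (List Char)) :
    PySem.Chars.strip (jp ['\n'] xs) = PySem.Chars.strip (PySem.Chars.join ['\n'] xs) := by
  rw [jp_eq]
  cases xs with
  | nil => simp [PySem.Chars.join_nil]
  | cons x xs => simpa using strip_cons_nl (PySem.Chars.join ['\n'] (x :: xs))

theorem strip_jp_eq_strip_join2 (xs : List (List Char)) :
    PySem.Chars.strip (jp ['\n', '\n'] xs) =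
      PySem.Chars.strip (PySem.Chars.join ['\n', '\n'] xs) := by
  rw [jp_eq]
  cases xs with
  | nil => simp [PySem.Chars.join_nil]
  | cons x xs =>
    have h1 := strip_cons_nl ('\n' :: PySem.Chars.join ['\n', '\n'] (x :: xs))
    have h2 := strip_cons_nl (PySem.Chars.join ['\n', '\n'] (x :: xs))
    simpa [h2] using h1

theorem runA_false_true (ls : List (List Char)) :
    PySem.Chars.strip (jp ['\n'] (runA ls false)) =
      PySem.Chars.strip (jp ['\n'] (runA ls true)) := by
  cases ls with
  | nil => rfl
  | cons l ls =>
    by_cases hl : PySem.Chars.strip l ≠ []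
    · simp [runA, hl]
    · simp only [runA, if_neg hl, Bool.false_eq_true]
      simpa using strip_cons_nl (jp ['\n'] (runA ls true))

theorem main_lines (ls : List (List Char)) :
    PySem.Chars.strip (PySem.Chars.join ['\n'] (runA ls false)) =
      PySem.Chars.strip (PySem.Chars.join ['\n', '\n'] (runB ls [])) := by
  rw [← strip_jp_eq_strip_join1, ← strip_jp_eq_strip_join2, runA_false_true]
  have h := (coreQR ls).2
  have h2 : PySem.Chars.strip ('\n' :: jp ['\n'] (runA ls true)) =
      PySem.Chars.strip (jp ['\n', '\n'] (runB ls []) ++ padR ls) := by rw [h]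
  rw [strip_cons_nl] at h2
  rw [h2]
  by_cases hp : trailBlank ls
  · simp only [padR, if_pos hp]
    exact strip_snoc_nl _
  · simp [padR, hp]

-- ===== VERDICT (by name: the statement is the Claim_ definition above) =====
theorem normalize_spacing_spec : Claim_equal_normalize_spacing := by
  intro text _
  simp only [Spec_normalize_spacing, normalize_spacing, normalize_spacing_alt]
  rw [foldA _ [] 0 (le_refl 0), foldB _ [] []]
  rw [show (decide ((0:Int) ≠ 0)) = false by decide]
  simp only [List.nil_append]
  rw [main_lines]
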